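-- pv_equiv track=rewrite | github.com/ndlevinzon/cryoDL | src/build_fasta.py | _find_matching_fasta
-- ===== SOURCE A (Python) =====
-- from typing import List, Dict, Optional, Tuple
--
-- def _find_matching_fasta(cif_sequence: str, fasta_data: Dict) -> Optional[str]:
--     """Find a FASTA sequence that matches the CIF sequence.
--
--     Args:
--         cif_sequence (str): Sequence from CIF file
--         fasta_data (Dict): Parsed FASTA data
--
--     Returns:
--         Optional[str]: Matching FASTA header, or None if no match found
--     """
--     if not cif_sequence:
--         return None
--
--     # Try exact matches first
--     for header, sequence in fasta_data.items():
--         if sequence == cif_sequence: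
--             return header
--
--     # Try partial matches (if CIF sequence is shorter)
--     for header, sequence in fasta_data.items():
--         if cif_sequence in sequence or sequence in cif_sequence:
--             return header
--
--     return None
-- ===== SOURCE B (Python) =====
-- from typing import Dict, Optional
--
-- def _find_matching_fasta(cif_sequence: str, fasta_data: Dict) -> Optional[str]:
--     # Single pass: return immediately on an exact match; remember the first
--     # partial match and return it only if no exact match exists.
--     if not cif_sequence:
--         return None
--     partial = None
--     for header, sequence in fasta_data.items():
--         if sequence == cif_sequence:
--             return header
--         if partial is None and (cif_sequence in sequence or sequence in cif_sequence):
--             partial = header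
--     return partial
-- ===== Notes on version B (the rewrite author's own statement) =====
-- stated objective: alternative
-- what changed: Replaces A's two full passes (exact pass, then partial pass) by a single pass that returns on an exact match and records the first partial candidate
import Mathlib
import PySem

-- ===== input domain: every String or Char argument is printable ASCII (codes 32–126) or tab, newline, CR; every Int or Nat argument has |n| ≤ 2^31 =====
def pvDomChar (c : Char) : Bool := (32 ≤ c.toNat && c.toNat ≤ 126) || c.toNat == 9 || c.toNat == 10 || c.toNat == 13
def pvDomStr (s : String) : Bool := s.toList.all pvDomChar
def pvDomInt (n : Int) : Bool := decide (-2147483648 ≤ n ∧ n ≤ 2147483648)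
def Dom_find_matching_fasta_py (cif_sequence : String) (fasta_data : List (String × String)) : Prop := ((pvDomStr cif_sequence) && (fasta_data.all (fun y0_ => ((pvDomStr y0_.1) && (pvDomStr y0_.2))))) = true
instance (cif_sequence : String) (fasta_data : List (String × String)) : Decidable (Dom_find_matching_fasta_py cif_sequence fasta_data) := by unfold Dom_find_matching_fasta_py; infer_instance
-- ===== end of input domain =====

-- B replaces A's two passes (exact, then partial) by one pass that returns on an
-- exact match and records the first partial candidate; same return value.

-- ===== PORT A =====
-- first loop of A: exact matches
def pvFindExact (cif : String) : List (String × String) → Option String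
  | [] => none
  | (h, s) :: rest => if s = cif then some h else pvFindExact cif rest

-- second loop of A: partial matches ('in' = PySem.Str.isIn)
def pvFindPartial (cif : String) : List (String × String) → Option String
  | [] => none
  | (h, s) :: rest =>
      if PySem.Str.isIn cif s || PySem.Str.isIn s cif then some h
      else pvFindPartial cif rest

def find_matching_fasta_py (cif_sequence : String) (fasta_data : List (String × String)) : Option String :=
  if cif_sequence = "" then none
  else
    match pvFindExact cif_sequence fasta_data with
    | some h => some h
    | none => pvFindPartial cif_sequence fasta_data

-- ===== PORT B =====
-- B's single loop, carrying the first recorded partial candidate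
def pvAltLoop (cif : String) (partial? : Option String) : List (String × String) → Option String
  | [] => partial?
  | (h, s) :: rest =>
      if s = cif then some h
      else
        pvAltLoop cif
          (if partial?.isNone && (PySem.Str.isIn cif s || PySem.Str.isIn s cif)
           then some h else partial?) rest

def find_matching_fasta_py_alt (cif_sequence : String) (fasta_data : List (String × String)) : Option String :=
  if cif_sequence = "" then none
  else pvAltLoop cif_sequence none fasta_data

-- ===== PRECONDITION & SPEC =====
def Spec_find_matching_fasta_py (cif_sequence : String) (fasta_data : List (String × String)) (out : Option String) : Prop := out = find_matching_fasta_py_alt cif_sequence fasta_data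
instance (cif_sequence : String) (fasta_data : List (String × String)) (out : Option String) : Decidable (Spec_find_matching_fasta_py cif_sequence fasta_data out) := by unfold Spec_find_matching_fasta_py; infer_instance

-- ===== CLAIM (what is proved, stated in full; the proofs are below) =====
def Claim_equal_find_matching_fasta_py : Prop := ∀ (cif_sequence : String) (fasta_data : List (String × String)), Dom_find_matching_fasta_py cif_sequence fasta_data → Spec_find_matching_fasta_py cif_sequence fasta_data (find_matching_fasta_py cif_sequence fasta_data)

-- ===== LEMMAS AND PROOFS =====

-- B's one-pass loop equals A's two passes, with the carried candidate slotted in between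
theorem pvAltLoop_eq (cif : String) (p : Option String) (xs : List (String × String)) :
    pvAltLoop cif p xs = ((pvFindExact cif xs).or (p.or (pvFindPartial cif xs))) := by
  induction xs generalizing p with
  | nil => cases p <;> simp [pvAltLoop, pvFindExact, pvFindPartial]
  | cons hd rest ih =>
      obtain ⟨h, s⟩ := hd
      by_cases hx : s = cif
      · simp [pvAltLoop, pvFindExact, hx]
      · cases p with
        | some q => simp [pvAltLoop, pvFindExact, pvFindPartial, hx, ih]
        | none =>
            simp only [pvAltLoop, pvFindExact, pvFindPartial, hx, if_false, ih,
              Option.isNone_none, Bool.true_and]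
            split <;> simp

-- ===== VERDICT (by name: the statement is the Claim_ definition above) =====
theorem find_matching_fasta_py_spec : Claim_equal_find_matching_fasta_py := by
  intro cif xs _
  unfold Spec_find_matching_fasta_py find_matching_fasta_py find_matching_fasta_py_alt
  by_cases h0 : cif = ""
  · simp [h0]
  · simp only [h0, if_false]
    rw [pvAltLoop_eq]
    cases pvFindExact cif xs <;> simp [Option.or]
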